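-- pv_equiv track=rewrite | github.com/ecolitan/chessdev | chessdev/boardrelations.py | CalculateDiags
-- ===== SOURCE A (Python) =====
-- def CalculateDiags(square):
--     """Calculates diagonals expanding outwards from a square.
--     Accepts tuple for the square position.
--     Returns List of 4 Lists
--
--     There are 1,2,3 or 4 diagonals depending on where the square is.
--     [[1],[2],[3],[4]] ->
--         1. Up and towards the right.
--         2. Down and towards the right.
--         3. Up and towards the left.
--         4. Down and towards the left.
--     Empty lists occur when the position in on a board edge.
--     Index position 0 in each non-empty list is at distance 1 (adjacent).
--     The following members are consequtively one further square away.
--     """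
--
--     # Up and towards the right.
--     def upright(square):
--         n, m = square
--         A = []
--         def testend(a, b):
--             if (a == 7 or b == 7):
--                 return True
--             return False
--         while not testend(n, m):
--             n += 1
--             m += 1
--             A.append((n,m))
--         return A
--
--     # Down and towards the right.
--     def downright(square):
--         n, m = square
--         A = []
--         def testend(a, b):
--             if (a == 7 or b == 0):
--                 return True
--             return False
--         while not testend(n, m):
--             n += 1
--             m -= 1
--             A.append((n,m))
--         return A
--
--     # Up and towards the left.
--     def upleft(square):
--         n, m = square
--         A = []
--         def testend(a, b):
--             if (a == 0 or b == 7):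
--                 return True
--             return False
--         while not testend(n, m):
--             n -= 1
--             m += 1
--             A.append((n,m))
--         return A
--
--     # Down and towards the left.
--     def downleft(square):
--         n, m = square
--         A = []
--         def testend(a, b):
--             if (a == 0 or b == 0):
--                 return True
--             return False
--         while not testend(n, m):
--             n -= 1
--             m -= 1
--             A.append((n,m))
--         return A
--
--     return [upright(square), downright(square), upleft(square), downleft(square)]
-- ===== SOURCE B (Python) =====
-- def CalculateDiags(square):
--     """Closed-form version: each diagonal's length is the smallest non-negative
--     signed distance to one of the direction's two stopping edges; build it with
--     one range comprehension per direction (no step-by-step edge test)."""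
--     n, m = square
--
--     def ray(dn, dm):
--         en = 7 if dn == 1 else 0
--         em = 7 if dm == 1 else 0
--         steps = min(k for k in ((en - n) * dn, (em - m) * dm) if k >= 0)
--         return [(n + dn * k, m + dm * k) for k in range(1, steps + 1)]
--
--     return [ray(1, 1), ray(1, -1), ray(-1, 1), ray(-1, -1)]
-- ===== Notes on version B (the rewrite author's own statement) =====
-- stated objective: simpler
-- what changed: B computes each diagonal's length in closed form (the least non-negative signed distance to one of the direction's two stopping edges) and builds it with one range comprehension per direction, instead of A's four step-by-step while loops testing an edge each step.
import Mathlib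
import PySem

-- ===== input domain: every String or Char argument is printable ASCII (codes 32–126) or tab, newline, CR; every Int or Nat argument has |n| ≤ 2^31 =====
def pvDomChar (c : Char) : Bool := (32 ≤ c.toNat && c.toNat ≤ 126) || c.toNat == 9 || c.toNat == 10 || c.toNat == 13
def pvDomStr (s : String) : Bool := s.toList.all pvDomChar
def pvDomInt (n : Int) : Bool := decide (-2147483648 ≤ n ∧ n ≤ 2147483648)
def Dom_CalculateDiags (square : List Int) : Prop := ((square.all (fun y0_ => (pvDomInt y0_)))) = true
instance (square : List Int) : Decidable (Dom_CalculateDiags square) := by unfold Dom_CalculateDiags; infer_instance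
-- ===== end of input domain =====

-- B replaces A's four edge-testing while loops by a closed-form diagonal length
-- (least non-negative signed distance to a stopping edge) and one range map per direction.


-- ===== PORT A =====
-- Each Python `while not testend(n,m): …` loop is ported with a fuel parameter
-- that only makes the recursion total; on Pre_ inputs one coordinate lies in
-- 0..7, so every loop stops within 7 steps and fuel 16 never runs out.
def pvUprightA (fuel : Nat) (n m : Int) (acc : List (List Int)) : List (List Int) :=
  match fuel with
  | 0 => acc
  | f + 1 =>
    if n = 7 ∨ m = 7 then acc
    else pvUprightA f (n + 1) (m + 1) (acc ++ [[n + 1, m + 1]])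

def pvDownrightA (fuel : Nat) (n m : Int) (acc : List (List Int)) : List (List Int) :=
  match fuel with
  | 0 => acc
  | f + 1 =>
    if n = 7 ∨ m = 0 then acc
    else pvDownrightA f (n + 1) (m - 1) (acc ++ [[n + 1, m - 1]])

def pvUpleftA (fuel : Nat) (n m : Int) (acc : List (List Int)) : List (List Int) :=
  match fuel with
  | 0 => acc
  | f + 1 =>
    if n = 0 ∨ m = 7 then acc
    else pvUpleftA f (n - 1) (m + 1) (acc ++ [[n - 1, m + 1]])

def pvDownleftA (fuel : Nat) (n m : Int) (acc : List (List Int)) : List (List Int) :=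
  match fuel with
  | 0 => acc
  | f + 1 =>
    if n = 0 ∨ m = 0 then acc
    else pvDownleftA f (n - 1) (m - 1) (acc ++ [[n - 1, m - 1]])

def CalculateDiags (square : List Int) : List (List (List Int)) :=
  match square with
  | [n, m] =>
    [pvUprightA 16 n m [], pvDownrightA 16 n m [],
     pvUpleftA 16 n m [], pvDownleftA 16 n m []]
  | _ => []    -- Python raises on unpacking; excluded by Pre_

-- ===== PORT B =====
def pvRayB (n m dn dm : Int) : List (List Int) :=
  let en : Int := if dn = 1 then 7 else 0
  let em : Int := if dm = 1 then 7 else 0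
  match PySem.List.min? (([(en - n) * dn, (em - m) * dm]).filter (fun k => decide (0 ≤ k))) (fun k => k) with
  | some steps => (PySem.List.pyRange 1 (steps + 1) 1).map (fun k => [n + dn * k, m + dm * k])
  | none => []    -- Python's min() of an empty generator raises ValueError; excluded by Pre_

def CalculateDiags_alt (square : List Int) : List (List (List Int)) :=
  if square.length = 2 then    -- Python's `n, m = square` raises otherwise; excluded by Pre_
    let n := square.getD 0 0
    let m := square.getD 1 0
    [pvRayB n m 1 1, pvRayB n m 1 (-1), pvRayB n m (-1) 1, pvRayB n m (-1) (-1)]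
  else []

-- ===== PRECONDITION & SPEC =====
-- Pre_ is exactly the set of inputs where the Python A returns: two coordinates
-- (otherwise unpacking raises) of which at least one lies in 0..7 (otherwise at
-- least one of the four while loops never meets its stopping test and A loops forever).
def Pre_CalculateDiags (square : List Int) : Prop :=
  square.length = 2 ∧
    ((0 ≤ square.getD 0 0 ∧ square.getD 0 0 ≤ 7) ∨ (0 ≤ square.getD 1 0 ∧ square.getD 1 0 ≤ 7))
instance (square : List Int) : Decidable (Pre_CalculateDiags square) := by
  unfold Pre_CalculateDiags; infer_instance

def pvWitness_CalculateDiags : List Int := [2, 3]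

def Spec_CalculateDiags (square : List Int) (out : List (List (List Int))) : Prop := out = CalculateDiags_alt square
instance (square : List Int) (out : List (List (List Int))) : Decidable (Spec_CalculateDiags square out) := by unfold Spec_CalculateDiags; infer_instance

-- ===== CLAIM (what is proved, stated in full; the proofs are below) =====
def Claim_equal_CalculateDiags : Prop := ∀ (square : List Int), Dom_CalculateDiags square → Pre_CalculateDiags square → Spec_CalculateDiags square (CalculateDiags square)

-- ===== LEMMAS AND PROOFS =====

-- generic form of A's four loops: direction (dn,dm), stopping edges (en,em)
def pvWalk (fuel : Nat) (dn dm en em n m : Int) (acc : List (List Int)) : List (List Int) :=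
  match fuel with
  | 0 => acc
  | f + 1 =>
    if n = en ∨ m = em then acc
    else pvWalk f dn dm en em (n + dn) (m + dm) (acc ++ [[n + dn, m + dm]])

theorem pvUprightA_eq_walk (fuel : Nat) : ∀ (n m : Int) (acc : List (List Int)),
    pvUprightA fuel n m acc = pvWalk fuel 1 1 7 7 n m acc := by
  induction fuel with
  | zero => intro n m acc; rfl
  | succ f ih =>
    intro n m acc; rw [pvUprightA, pvWalk]; split_ifs with h
    · rfl
    · exact ih _ _ _

theorem pvDownrightA_eq_walk (fuel : Nat) : ∀ (n m : Int) (acc : List (List Int)),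
    pvDownrightA fuel n m acc = pvWalk fuel 1 (-1) 7 0 n m acc := by
  induction fuel with
  | zero => intro n m acc; rfl
  | succ f ih =>
    intro n m acc; rw [pvDownrightA, pvWalk]; split_ifs with h
    · rfl
    · rw [ih]; ring_nf

theorem pvUpleftA_eq_walk (fuel : Nat) : ∀ (n m : Int) (acc : List (List Int)),
    pvUpleftA fuel n m acc = pvWalk fuel (-1) 1 0 7 n m acc := by
  induction fuel with
  | zero => intro n m acc; rfl
  | succ f ih =>
    intro n m acc; rw [pvUpleftA, pvWalk]; split_ifs with h
    · rfl
    · rw [ih]; ring_nf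

theorem pvDownleftA_eq_walk (fuel : Nat) : ∀ (n m : Int) (acc : List (List Int)),
    pvDownleftA fuel n m acc = pvWalk fuel (-1) (-1) 0 0 n m acc := by
  induction fuel with
  | zero => intro n m acc; rfl
  | succ f ih =>
    intro n m acc; rw [pvDownleftA, pvWalk]; split_ifs with h
    · rfl
    · rw [ih]; ring_nf

-- A's loop runs exactly s steps when s is the first step index hitting an edge
theorem pvWalk_eq (s : Nat) : ∀ (fuel : Nat) (dn dm en em n m : Int) (acc : List (List Int)),
    s ≤ fuel →
    (n + dn * s = en ∨ m + dm * s = em) →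
    (∀ k : Nat, k < s → n + dn * k ≠ en ∧ m + dm * k ≠ em) →
    pvWalk fuel dn dm en em n m acc
      = acc ++ (List.range s).map (fun (k : Nat) => [n + dn * (1 + (k : Int)), m + dm * (1 + (k : Int))]) := by
  induction s with
  | zero =>
    intro fuel dn dm en em n m acc _ hreach _
    have h0 : n = en ∨ m = em := by simpa using hreach
    cases fuel with
    | zero => simp [pvWalk]
    | succ f => simp [pvWalk, h0]
  | succ s ih =>
    intro fuel dn dm en em n m acc hfuel hreach hmin
    obtain ⟨hn0, hm0⟩ := hmin 0 (Nat.succ_pos s)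
    cases fuel with
    | zero => omega
    | succ f =>
      have hn0' : n ≠ en := by simpa using hn0
      have hm0' : m ≠ em := by simpa using hm0
      rw [pvWalk, if_neg (by tauto)]
      rw [ih f dn dm en em (n + dn) (m + dm) (acc ++ [[n + dn, m + dm]]) (by omega)
            ?_ ?_]
      · rw [List.append_assoc, List.singleton_append, List.range_succ_eq_map]
        simp only [List.map_cons, List.map_map]
        rw [List.append_right_inj, List.cons_eq_cons]
        refine ⟨by push_cast; ring_nf, ?_⟩
        apply List.map_congr_left
        intro k _
        simp only [Function.comp_apply, Nat.succ_eq_add_one]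
        push_cast
        ring_nf
      · rcases hreach with h | h
        · left; push_cast at h ⊢; linear_combination h
        · right; push_cast at h ⊢; linear_combination h
      · intro k hk
        obtain ⟨h1, h2⟩ := hmin (k + 1) (by omega)
        constructor
        · intro h; apply h1; push_cast at h ⊢; linear_combination h
        · intro h; apply h2; push_cast at h ⊢; linear_combination h

-- B's range map, rewritten over List.range
theorem pvRange_map_eq (f : Int → List Int) (v : Int) :
    (PySem.List.pyRange 1 (v + 1) 1).map f
      = (List.range v.toNat).map (fun (k : Nat) => f (1 + (k : Int))) := by
  rw [PySem.List.pyRange_one, List.map_map]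
  have : (v + 1 - 1).toNat = v.toNat := by omega
  rw [this]
  rfl

-- one direction: A's loop with enough fuel equals B's closed-form ray
theorem pvWalk_eq_ray (dn dm en em n m : Int)
    (hdn : dn = 1 ∧ en = 7 ∨ dn = -1 ∧ en = 0)
    (hdm : dm = 1 ∧ em = 7 ∨ dm = -1 ∧ em = 0)
    (hfeas : (0 ≤ (en - n) * dn ∧ (en - n) * dn ≤ 7) ∨ (0 ≤ (em - m) * dm ∧ (em - m) * dm ≤ 7)) :
    pvWalk 16 dn dm en em n m []
      = pvRayB n m dn dm := by
  have hdn2 : dn * dn = 1 := by rcases hdn with ⟨h, _⟩ | ⟨h, _⟩ <;> rw [h] <;> norm_num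
  have hdm2 : dm * dm = 1 := by rcases hdm with ⟨h, _⟩ | ⟨h, _⟩ <;> rw [h] <;> norm_num
  have hdn1 : dn ≠ 1 → dn = -1 := by rcases hdn with ⟨h, _⟩ | ⟨h, _⟩ <;> rw [h] <;> norm_num
  set c1 := (en - n) * dn with hc1
  set c2 := (em - m) * dm with hc2
  have hen : (if dn = 1 then (7:Int) else 0) = en := by
    rcases hdn with ⟨h, h'⟩ | ⟨h, h'⟩ <;> rw [h, h'] <;> norm_num
  have hem : (if dm = 1 then (7:Int) else 0) = em := by
    rcases hdm with ⟨h, h'⟩ | ⟨h, h'⟩ <;> rw [h, h'] <;> norm_num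
  -- the chosen step count
  have main : ∀ v : Int, 0 ≤ v → v ≤ 7 → (v = c1 ∨ v = c2) →
      (0 ≤ c1 → v ≤ c1) → (0 ≤ c2 → v ≤ c2) →
      pvWalk 16 dn dm en em n m []
        = (PySem.List.pyRange 1 (v + 1) 1).map (fun k => [n + dn * k, m + dm * k]) := by
    intro v hv0 hv7 hvc hmin1 hmin2
    have hvnat : ((v.toNat : Int)) = v := Int.toNat_of_nonneg hv0
    rw [pvWalk_eq v.toNat 16 dn dm en em n m [] (by omega) ?_ ?_]
    · rw [pvRange_map_eq]
      simp
    · -- reaching an edge at step v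
      rcases hvc with h | h
      · left; rw [hvnat, h, hc1]; linear_combination (en - n) * hdn2
      · right; rw [hvnat, h, hc2]; linear_combination (em - m) * hdm2
    · -- no edge before step v
      intro k hk
      have hkv : (k : Int) < v := by omega
      have hk0 : (0:Int) ≤ k := by positivity
      constructor
      · intro h
        have hkc1 : (k : Int) = c1 := by rw [hc1]; linear_combination dn * h - (k : Int) * hdn2
        have hv1 : v ≤ c1 := hmin1 (by omega)
        omega
      · intro h
        have hkc2 : (k : Int) = c2 := by rw [hc2]; linear_combination dm * h - (k : Int) * hdm2
        have hv2 : v ≤ c2 := hmin2 (by omega)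
        omega
  -- evaluate B's min over the non-negative candidates
  rw [pvRayB]
  simp only [hen, hem, ← hc1, ← hc2]
  by_cases h1 : 0 ≤ c1 <;> by_cases h2 : 0 ≤ c2
  · have hf : [c1, c2].filter (fun k => decide (0 ≤ k)) = [c1, c2] := by simp [h1, h2]
    rw [hf, PySem.List.min?_id_cons]
    simp only [List.foldl]
    rw [main (min c1 c2) (by omega) (by omega) (by omega) (by omega) (by omega)]
  · have hf : [c1, c2].filter (fun k => decide (0 ≤ k)) = [c1] := by simp [h1, h2]
    rw [hf, PySem.List.min?_id_cons]
    simp only [List.foldl]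
    rw [main c1 h1 (by omega) (Or.inl rfl) (by omega) (by omega)]
  · have hf : [c1, c2].filter (fun k => decide (0 ≤ k)) = [c2] := by simp [h1, h2]
    rw [hf, PySem.List.min?_id_cons]
    simp only [List.foldl]
    rw [main c2 h2 (by omega) (Or.inr rfl) (by omega) (by omega)]
  · exfalso; rcases hfeas with ⟨a, _⟩ | ⟨a, _⟩ <;> omega

-- ===== VERDICT (by name: the statement is the Claim_ definition above) =====
theorem CalculateDiags_spec : Claim_equal_CalculateDiags := by
  unfold Claim_equal_CalculateDiags Spec_CalculateDiags Pre_CalculateDiags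
  intro square _ hpre
  obtain ⟨hlen, hrange⟩ := hpre
  match square, hlen with
  | [n, m], _ =>
    simp only [List.getD, List.getElem?_cons_zero, List.getElem?_cons_succ, Option.getD_some] at hrange
    have hrw : CalculateDiags_alt [n, m]
        = [pvRayB n m 1 1, pvRayB n m 1 (-1), pvRayB n m (-1) 1, pvRayB n m (-1) (-1)] := by
      simp [CalculateDiags_alt]
    rw [CalculateDiags, hrw,
        pvUprightA_eq_walk, pvDownrightA_eq_walk, pvUpleftA_eq_walk, pvDownleftA_eq_walk,
        pvWalk_eq_ray 1 1 7 7 n m (by norm_num) (by norm_num) (by rcases hrange with h | h <;> [left; right] <;> constructor <;> omega),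
        pvWalk_eq_ray 1 (-1) 7 0 n m (by norm_num) (by norm_num) (by rcases hrange with h | h <;> [left; right] <;> constructor <;> omega),
        pvWalk_eq_ray (-1) 1 0 7 n m (by norm_num) (by norm_num) (by rcases hrange with h | h <;> [left; right] <;> constructor <;> omega),
        pvWalk_eq_ray (-1) (-1) 0 0 n m (by norm_num) (by norm_num) (by rcases hrange with h | h <;> [left; right] <;> constructor <;> omega)]
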